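-- pv_equiv track=rewrite | github.com/martijnsouman/PinPoach_Thesis | ml-test/src/data/datagenerator.py | getLayerPermutations
-- ===== SOURCE A (Python) =====
-- def getLayerPermutations(layer_options):
--     permutations = list()
--
--     #Calculate the amount of permutations
--     nPermutations = 2 ** len(layer_options)
--
--     #Loop through all permutations
--     for i in range(0, nPermutations):
--         perm = list()
--
--         #Loop through the layers
--         for j in range(0, len(layer_options)):
--             #Select an option
--             optionIndex = int(i & (1 << j) > 0)
--             option = layer_options[j][optionIndex]
--
--             #Append the option if not None
--             if option != None:
--                 perm.append(option)
--
--         #Append the permutation to the list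
--         permutations.append(perm)
--
--     return permutations
-- ===== SOURCE B (Python) =====
-- def getLayerPermutations(layer_options):
--     # Incremental doubling: layer j becomes bit j (layer 0 fastest-varying).
--     result = [[]]
--     for layer in layer_options:
--         opt0 = layer[0]
--         opt1 = layer[1]
--         lo_half = [p + [opt0] for p in result] if opt0 != None else [list(p) for p in result]
--         hi_half = [p + [opt1] for p in result] if opt1 != None else [list(p) for p in result]
--         result = lo_half + hi_half
--     return result
-- ===== Notes on version B (the rewrite author's own statement) =====
-- stated objective: alternative
-- what changed: B builds the permutation list incrementally by doubling a running list per layer (appending option 0 then option 1 halves) instead of decoding the bits of every index 0..2^n-1 in a nested loop.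
import Mathlib
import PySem

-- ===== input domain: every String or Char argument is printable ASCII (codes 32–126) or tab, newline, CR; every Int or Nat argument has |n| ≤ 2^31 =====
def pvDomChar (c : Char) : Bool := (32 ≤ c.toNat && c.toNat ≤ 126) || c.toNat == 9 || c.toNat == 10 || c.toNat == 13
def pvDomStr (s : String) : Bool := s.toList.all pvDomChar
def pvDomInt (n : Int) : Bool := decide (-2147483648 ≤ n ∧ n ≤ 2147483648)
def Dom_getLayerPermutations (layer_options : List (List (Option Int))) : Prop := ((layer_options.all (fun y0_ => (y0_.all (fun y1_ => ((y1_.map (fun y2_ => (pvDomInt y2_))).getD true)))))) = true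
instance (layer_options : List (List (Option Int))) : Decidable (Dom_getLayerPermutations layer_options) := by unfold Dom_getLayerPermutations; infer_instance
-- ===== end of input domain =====

-- B replaces A's per-index bit decoding with an incremental per-layer doubling of the
-- result list (alternative decomposition, same asymptotic cost).

-- ===== PORT A =====
-- Literal port of A. The loop counters i, j are the nonnegative ints of Python's
-- range, ported as Nat so that `i & (1 << j)` is Nat's bitwise and (exact for
-- nonnegative ints). The indexings layer_options[j] (always in range) and
-- layer_options[j][optionIndex] (in range under Pre_, IndexError — excluded —
-- otherwise) are ported with List.getD.
def getLayerPermutations (layer_options : List (List (Option Int))) : List (List Int) :=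
  let nPermutations := 2 ^ layer_options.length
  (List.range nPermutations).foldl (fun permutations i =>
    let perm := (List.range layer_options.length).foldl (fun perm j =>
      let optionIndex : Nat := if 0 < i &&& (1 <<< j) then 1 else 0
      let option := (layer_options.getD j []).getD optionIndex none
      match option with
      | some o => perm ++ [o]
      | none => perm) []
    permutations ++ [perm]) []

-- ===== PORT B =====
-- Literal port of B; layer[0] / layer[1] (in range under Pre_) ported with List.getD.
def getLayerPermutations_alt (layer_options : List (List (Option Int))) : List (List Int) :=
  layer_options.foldl (fun result layer =>
    let opt0 := layer.getD 0 none
    let opt1 := layer.getD 1 none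
    let lo_half := match opt0 with
      | some v => result.map (fun p => p ++ [v])
      | none => result
    let hi_half := match opt1 with
      | some v => result.map (fun p => p ++ [v])
      | none => result
    lo_half ++ hi_half) [[]]

-- ===== PRECONDITION & SPEC =====
-- Pre_ excludes exactly the inputs on which the Python A raises IndexError: as soon
-- as there is any layer, every layer gets indexed at [0] and at [1], so A returns
-- normally iff every layer has at least 2 options. (Python B raises there too.)
def Pre_getLayerPermutations (layer_options : List (List (Option Int))) : Prop :=
  ∀ layer ∈ layer_options, 2 ≤ layer.length
instance (layer_options : List (List (Option Int))) : Decidable (Pre_getLayerPermutations layer_options) := by unfold Pre_getLayerPermutations; infer_instance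
def pvWitness_getLayerPermutations : List (List (Option Int)) :=
  [[some 1, none], [some 2, some 3]]

def Spec_getLayerPermutations (layer_options : List (List (Option Int))) (out : List (List Int)) : Prop := out = getLayerPermutations_alt layer_options
instance (layer_options : List (List (Option Int))) (out : List (List Int)) : Decidable (Spec_getLayerPermutations layer_options out) := by unfold Spec_getLayerPermutations; infer_instance

-- ===== CLAIM (what is proved, stated in full; the proofs are below) =====
def Claim_equal_getLayerPermutations : Prop := ∀ (layer_options : List (List (Option Int))), Dom_getLayerPermutations layer_options → Pre_getLayerPermutations layer_options → Spec_getLayerPermutations layer_options (getLayerPermutations layer_options)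

-- ===== LEMMAS AND PROOFS =====

-- The row A builds for index i: the inner j-loop of A.
def pvRowA (lo : List (List (Option Int))) (i : Nat) : List Int :=
  (List.range lo.length).foldl (fun perm j =>
    let optionIndex : Nat := if 0 < i &&& (1 <<< j) then 1 else 0
    let option := (lo.getD j []).getD optionIndex none
    match option with
    | some o => perm ++ [o]
    | none => perm) []

-- B's per-layer step.
def pvBStep (result : List (List Int)) (layer : List (Option Int)) : List (List Int) :=
  (match layer.getD 0 none with
    | some v => result.map (fun p => p ++ [v])
    | none => result) ++
  (match layer.getD 1 none with
    | some v => result.map (fun p => p ++ [v])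
    | none => result)

lemma pvFoldl_snoc_map {α β : Type} (f : α → β) :
    ∀ (l : List α) (acc : List β),
      l.foldl (fun a i => a ++ [f i]) acc = acc ++ l.map f := by
  intro l
  induction l with
  | nil => simp
  | cons x xs ih => intro acc; simp [List.foldl_cons, ih]

lemma pvA_eq_map (lo : List (List (Option Int))) :
    getLayerPermutations lo = (List.range (2 ^ lo.length)).map (pvRowA lo) := by
  simpa [getLayerPermutations, pvRowA] using
    pvFoldl_snoc_map (pvRowA lo) (List.range (2 ^ lo.length)) []

lemma pvB_eq_foldl (lo : List (List (Option Int))) :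
    getLayerPermutations_alt lo = lo.foldl pvBStep [[]] := rfl

lemma pvBit_iff (i j : Nat) : (0 < i &&& (1 <<< j)) ↔ i.testBit j = true := by
  rw [Nat.one_shiftLeft, Nat.and_two_pow]
  cases h : i.testBit j <;> simp

lemma pvRowA_snoc_lo (ls : List (List (Option Int))) (l : List (Option Int))
    (i : Nat) (hi : i < 2 ^ ls.length) :
    pvRowA (ls ++ [l]) i =
      (match l.getD 0 none with
        | some v => pvRowA ls i ++ [v]
        | none => pvRowA ls i) := by
  unfold pvRowA
  have hlen : (ls ++ [l]).length = ls.length + 1 := by simp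
  rw [hlen, List.range_succ, List.foldl_append]
  have hcong :
      (List.range ls.length).foldl (fun perm j =>
        let optionIndex : Nat := if 0 < i &&& (1 <<< j) then 1 else 0
        let option := ((ls ++ [l]).getD j []).getD optionIndex none
        match option with
        | some o => perm ++ [o]
        | none => perm) [] =
      (List.range ls.length).foldl (fun perm j =>
        let optionIndex : Nat := if 0 < i &&& (1 <<< j) then 1 else 0
        let option := (ls.getD j []).getD optionIndex none
        match option with
        | some o => perm ++ [o]
        | none => perm) [] := by
    apply PySem.List.foldl_congr_mem
    intro a j hj
    have hjlt : j < ls.length := List.mem_range.mp hj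
    simp [List.getElem?_append_left hjlt]
  rw [hcong]
  have hbit : ¬ 0 < i &&& (1 <<< ls.length) := by
    rw [pvBit_iff, Nat.testBit_lt_two_pow hi]
    simp
  have hget : (ls ++ [l]).getD ls.length [] = l := by
    simp [List.getD]
  simp only [List.foldl_cons, List.foldl_nil, hbit, if_false, hget]

lemma pvRowA_snoc_hi (ls : List (List (Option Int))) (l : List (Option Int))
    (k : Nat) (hk : k < 2 ^ ls.length) :
    pvRowA (ls ++ [l]) (2 ^ ls.length + k) =
      (match l.getD 1 none with
        | some v => pvRowA ls k ++ [v]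
        | none => pvRowA ls k) := by
  unfold pvRowA
  have hlen : (ls ++ [l]).length = ls.length + 1 := by simp
  rw [hlen, List.range_succ, List.foldl_append]
  have hcong :
      (List.range ls.length).foldl (fun perm j =>
        let optionIndex : Nat := if 0 < (2 ^ ls.length + k) &&& (1 <<< j) then 1 else 0
        let option := ((ls ++ [l]).getD j []).getD optionIndex none
        match option with
        | some o => perm ++ [o]
        | none => perm) [] =
      (List.range ls.length).foldl (fun perm j =>
        let optionIndex : Nat := if 0 < k &&& (1 <<< j) then 1 else 0
        let option := (ls.getD j []).getD optionIndex none
        match option with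
        | some o => perm ++ [o]
        | none => perm) [] := by
    apply PySem.List.foldl_congr_mem
    intro a j hj
    have hjlt : j < ls.length := List.mem_range.mp hj
    have hbits : (0 < (2 ^ ls.length + k) &&& (1 <<< j)) ↔ (0 < k &&& (1 <<< j)) := by
      rw [pvBit_iff, pvBit_iff, Nat.testBit_two_pow_add_gt hjlt k]
    simp [List.getElem?_append_left hjlt, hbits]
  rw [hcong]
  have hbit : 0 < (2 ^ ls.length + k) &&& (1 <<< ls.length) := by
    rw [pvBit_iff, Nat.testBit_two_pow_add_eq, Nat.testBit_lt_two_pow hk]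
    rfl
  have hget : (ls ++ [l]).getD ls.length [] = l := by
    simp [List.getD]
  simp only [List.foldl_cons, List.foldl_nil, hbit, if_true, hget]

lemma pvMain (lo : List (List (Option Int))) :
    (List.range (2 ^ lo.length)).map (pvRowA lo) = lo.foldl pvBStep [[]] := by
  induction lo using List.reverseRecOn with
  | nil => decide
  | append_singleton ls l ih =>
    have hlen : (ls ++ [l]).length = ls.length + 1 := by simp
    rw [hlen, List.foldl_append, List.foldl_cons, List.foldl_nil, ← ih]
    rw [pow_succ, mul_two, List.range_add]
    rw [List.map_append, List.map_map]
    have h1 : (List.range (2 ^ ls.length)).map (pvRowA (ls ++ [l])) =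
        (match l.getD 0 none with
          | some v => ((List.range (2 ^ ls.length)).map (pvRowA ls)).map (fun p => p ++ [v])
          | none => (List.range (2 ^ ls.length)).map (pvRowA ls)) := by
      cases h : l.getD 0 none with
      | none =>
        simp only
        apply List.map_congr_left
        intro i hi
        rw [pvRowA_snoc_lo ls l i (List.mem_range.mp hi), h]
      | some v =>
        simp only [List.map_map]
        apply List.map_congr_left
        intro i hi
        rw [pvRowA_snoc_lo ls l i (List.mem_range.mp hi), h]
        simp [Function.comp]
    have h2 : (List.range (2 ^ ls.length)).map (pvRowA (ls ++ [l]) ∘ (2 ^ ls.length + ·)) =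
        (match l.getD 1 none with
          | some v => ((List.range (2 ^ ls.length)).map (pvRowA ls)).map (fun p => p ++ [v])
          | none => (List.range (2 ^ ls.length)).map (pvRowA ls)) := by
      cases h : l.getD 1 none with
      | none =>
        simp only
        apply List.map_congr_left
        intro k hk
        simp only [Function.comp]
        rw [pvRowA_snoc_hi ls l k (List.mem_range.mp hk), h]
      | some v =>
        simp only [List.map_map]
        apply List.map_congr_left
        intro k hk
        simp only [Function.comp]
        rw [pvRowA_snoc_hi ls l k (List.mem_range.mp hk), h]
    rw [h1, h2, pvBStep]

-- ===== VERDICT (by name: the statement is the Claim_ definition above) =====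
theorem getLayerPermutations_spec : Claim_equal_getLayerPermutations := by
  intro lo _ _
  unfold Spec_getLayerPermutations
  rw [pvA_eq_map, pvB_eq_foldl, pvMain]
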